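-- pv_equiv track=rewrite | github.com/jaeyoonheo/coding-test | programmers/옹알이(2).py | solution
-- ===== SOURCE A (Python) =====
-- def solution(babbling):
--     answer = 0
--
--     base = ["aya", "ye", "woo", "ma"]
--     for x in babbling:
--         stack = ''
--         prev = ''
--
--         for char in x:
--             stack += char
--
--             if prev != stack and stack in base:
--                 prev = stack
--                 stack = ''
--
--         if len(stack) == 0:
--             answer += 1
--
--     return answer
-- ===== SOURCE B (Python) =====
-- def solution(babbling):
--     base = ["aya", "ye", "woo", "ma"]
--     count = 0
--     for x in babbling:
--         tokens = []
--         i = 0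
--         ok = True
--         while i < len(x):
--             for b in base:
--                 if x.startswith(b, i):
--                     tokens.append(b)
--                     i += len(b)
--                     break
--             else:
--                 ok = False
--                 break
--         if ok and all(a != b for a, b in zip(tokens, tokens[1:])):
--             count += 1
--     return count
-- ===== Notes on version B (the rewrite author's own statement) =====
-- stated objective: alternative
-- what changed: A scans each word char-by-char growing a stack and clearing it when it equals a base sound different from the previous one; B instead greedily tokenizes each word with startswith jumps over whole base sounds and then checks the built token list for adjacent duplicates in a separate pass.
import Mathlib
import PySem

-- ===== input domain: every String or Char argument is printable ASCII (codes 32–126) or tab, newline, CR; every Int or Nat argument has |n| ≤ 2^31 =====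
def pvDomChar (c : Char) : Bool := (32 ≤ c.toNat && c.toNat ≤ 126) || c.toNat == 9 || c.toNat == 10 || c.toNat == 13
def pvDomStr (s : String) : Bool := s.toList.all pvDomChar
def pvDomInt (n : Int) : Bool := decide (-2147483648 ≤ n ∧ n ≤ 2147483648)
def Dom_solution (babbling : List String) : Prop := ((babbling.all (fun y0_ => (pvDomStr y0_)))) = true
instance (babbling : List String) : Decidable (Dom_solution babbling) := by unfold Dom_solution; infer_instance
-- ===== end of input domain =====

-- B replaces A's char-by-char stack scan with greedy startswith tokenization plus a
-- separate adjacent-duplicate pass over the token list (objective: alternative decomposition).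

-- ===== PORT A =====
-- base = ["aya", "ye", "woo", "ma"], as lists of chars (PySem strings are char lists)
def bases : List (List Char) := [['a','y','a'], ['y','e'], ['w','o','o'], ['m','a']]

-- one step of A's inner loop: state = (stack, prev)
def aStep (st : List Char × List Char) (c : Char) : List Char × List Char :=
  let stack := st.1 ++ [c]
  if st.2 ≠ stack ∧ stack ∈ bases then ([], stack) else (stack, st.2)

def solution (babbling : List String) : Int :=
  babbling.foldl (fun answer x =>
    let r := x.toList.foldl aStep ([], [])
    if r.1.length = 0 then answer + 1 else answer) 0

-- ===== PORT B =====
-- every base has length ≥ 1 (used for termination of the tokenizer)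
theorem bases_len : ∀ b ∈ bases, 1 ≤ b.length := by decide

-- B's while loop: greedy tokenization; i-index startswith is recursion on the suffix
def tok : List Char → Option (List (List Char))
  | [] => some []
  | c :: cs =>
    match hf : bases.find? (fun b => b.isPrefixOf (c :: cs)) with
    | none => none
    | some b => (tok ((c :: cs).drop b.length)).map (fun ts => b :: ts)
termination_by xs => xs.length
decreasing_by
  have hm := List.mem_of_find?_eq_some hf
  have h1 := bases_len _ hm
  simp; omega

-- all(a != b for a, b in zip(tokens, tokens[1:]))
def noAdj (ts : List (List Char)) : Bool :=
  (ts.zip (ts.drop 1)).all (fun p => p.1 ≠ p.2)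

def wordB (cs : List Char) : Bool :=
  match tok cs with
  | none => false
  | some ts => noAdj ts

def solution_alt (babbling : List String) : Int :=
  babbling.foldl (fun count x => if wordB x.toList then count + 1 else count) 0

-- ===== PRECONDITION & SPEC =====
def Spec_solution (babbling : List String) (out : Int) : Prop := out = solution_alt babbling
instance (babbling : List String) (out : Int) : Decidable (Spec_solution babbling out) := by unfold Spec_solution; infer_instance

-- ===== CLAIM (what is proved, stated in full; the proofs are below) =====
def Claim_equal_solution : Prop := ∀ (babbling : List String), Dom_solution babbling → Spec_solution babbling (solution babbling)

-- ===== LEMMAS AND PROOFS =====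

-- adjacency check with a virtual previous token (A's prev register)
def chainB (p : List Char) : List (List Char) → Bool
  | [] => true
  | t :: ts => (t ≠ p) && chainB t ts

theorem noAdj_cons2 (t u : List Char) (r : List (List Char)) :
    noAdj (t :: u :: r) = ((t ≠ u : Bool) && noAdj (u :: r)) := by
  simp [noAdj, List.zip]

theorem chainB_eq (ts : List (List Char)) : ∀ t, chainB t ts = noAdj (t :: ts) := by
  induction ts with
  | nil => intro t; simp [chainB, noAdj]
  | cons u r ih =>
    intro t
    rw [noAdj_cons2, chainB, ← ih u]
    simp [Bool.and_comm, ne_comm]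

-- bases are prefix-free
theorem bases_prefix_free : ∀ b ∈ bases, ∀ b' ∈ bases, b.isPrefixOf b' = true → b = b' := by decide

-- A's scan over a stretch in which the stack never matches a base just accumulates
theorem aRun (cs : List Char) : ∀ (acc p : List Char),
    (∀ m, 1 ≤ m → m ≤ cs.length → acc ++ cs.take m ∉ bases) →
    cs.foldl aStep (acc, p) = (acc ++ cs, p) := by
  induction cs with
  | nil => intro acc p _; simp
  | cons c cs ih =>
    intro acc p h
    have h1 : acc ++ [c] ∉ bases := by
      have := h 1 (by omega) (by simp)
      simpa using this
    have hstep : aStep (acc, p) c = (acc ++ [c], p) := by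
      simp [aStep, h1]
    rw [List.foldl_cons, hstep, ih (acc ++ [c]) p]
    · simp
    · intro m hm1 hm2 hmem
      have := h (m + 1) (by omega) (by simpa using hm2)
      apply this
      simpa [List.take_succ_cons] using hmem

-- scanning a base from empty stack with prev ≠ base clears the stack
theorem aRun_clear (b : List Char) (hb : b ∈ bases) (rest : List Char) (p : List Char)
    (hp : p ≠ b) : (b ++ rest).foldl aStep (([] : List Char), p) = rest.foldl aStep ([], b) := by
  fin_cases hb <;> simp_all [aStep, bases]

-- scanning a base from empty stack with prev = base is blocked: stack stays = base
theorem aRun_block (b : List Char) (hb : b ∈ bases) (rest : List Char) :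
    (b ++ rest).foldl aStep (([] : List Char), b) = rest.foldl aStep (b, b) := by
  fin_cases hb <;> simp [aStep, bases]

-- main per-word correspondence
theorem main_iff : ∀ n (cs : List Char), cs.length ≤ n → ∀ p, (p = [] ∨ p ∈ bases) →
    (((cs.foldl aStep (([] : List Char), p)).1 = []) ↔
      (∃ ts, tok cs = some ts ∧ chainB p ts = true)) := by
  intro n
  induction n with
  | zero =>
    intro cs hlen p _
    have : cs = [] := by cases cs <;> simp_all
    subst this
    simp [tok, chainB]
  | succ n ih =>
    intro cs hlen p hp
    cases cs with
    | nil => simp [tok, chainB]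
    | cons c cs' =>
      cases hfind : bases.find? (fun b => b.isPrefixOf (c :: cs')) with
      | none =>
        have htok : tok (c :: cs') = none := by rw [tok, hfind]
        have hnone := List.find?_eq_none.mp hfind
        have hstack : (c :: cs').foldl aStep (([] : List Char), p) = (c :: cs', p) := by
          have := aRun (c :: cs') [] p (by
            intro m hm1 hm2 hmem
            simp only [List.nil_append] at hmem
            have hpref : ((c :: cs').take m).isPrefixOf (c :: cs') = true := by
              simpa [List.isPrefixOf_iff_prefix] using List.take_prefix m (c :: cs')
            exact hnone _ hmem hpref)
          simpa using this
        rw [hstack, htok]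
        simp
      | some b =>
        have hbmem := List.mem_of_find?_eq_some hfind
        have hbpref : b.isPrefixOf (c :: cs') = true := by
          simpa using List.find?_some hfind
        obtain ⟨rest, hrest⟩ : b <+: (c :: cs') := List.isPrefixOf_iff_prefix.mp hbpref
        have hblen : 1 ≤ b.length := bases_len _ hbmem
        have hdrop : (c :: cs').drop b.length = rest := by
          rw [← hrest]; simp
        have htok : tok (c :: cs') = (tok rest).map (fun ts => b :: ts) := by
          rw [tok, hfind]
          show ((tok ((c :: cs').drop b.length)).map (fun ts => b :: ts)) = _
          rw [hdrop]
        have hrlen : rest.length ≤ n := by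
          have hl2 : (c :: cs').length = b.length + rest.length := by rw [← hrest]; simp
          simp at hl2 hlen; omega
        by_cases hpb : p = b
        · -- blocked: stack reaches b, prev = b, never clears afterwards
          subst hpb
          have hstack : (c :: cs').foldl aStep (([] : List Char), p) = (p ++ rest, p) := by
            rw [← hrest, aRun_block p hbmem rest]
            exact aRun rest p p (by
              intro m hm1 hm2 hmem
              have htm : rest.take m ≠ [] := by
                have : (rest.take m).length = m := by simp; omega
                intro hc; rw [hc] at this; simp at this; omega
              have hpr : p.isPrefixOf (p ++ rest.take m) = true := by
                simp [List.isPrefixOf_iff_prefix]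
              have := bases_prefix_free p hbmem _ hmem hpr
              exact htm (by simpa using this.symm))
          rw [hstack, htok]
          constructor
          · intro h
            exfalso
            have : p ≠ [] := by intro h0; rw [h0] at hblen; simp at hblen
            simp at h
            exact this h.1
          · rintro ⟨ts, hts, hch⟩
            cases htr : tok rest with
            | none => rw [htr] at hts; simp at hts
            | some ts' =>
              rw [htr] at hts
              simp at hts
              subst hts
              simp [chainB] at hch
        · -- clears: stack reaches b ≠ prev, resets, prev := b
          have hstack : (c :: cs').foldl aStep (([] : List Char), p) =
              rest.foldl aStep ([], b) := by
            rw [← hrest]; exact aRun_clear b hbmem rest p hpb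
          rw [hstack, htok]
          rw [ih rest hrlen b (Or.inr hbmem)]
          constructor
          · rintro ⟨ts', hts', hch⟩
            refine ⟨b :: ts', by rw [hts']; rfl, ?_⟩
            simp [chainB, hch]
            exact fun h => hpb h.symm
          · rintro ⟨ts, hts, hch⟩
            cases htr : tok rest with
            | none => rw [htr] at hts; simp at hts
            | some ts' =>
              rw [htr] at hts
              simp at hts
              subst hts
              simp [chainB] at hch
              exact ⟨ts', rfl, hch.2⟩

-- per-word: A's emptiness test equals B's verdict
theorem word_iff (cs : List Char) :
    (((cs.foldl aStep (([] : List Char), [])).1.length = 0) ↔ wordB cs = true) := by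
  rw [List.length_eq_zero_iff]
  rw [main_iff cs.length cs le_rfl [] (Or.inl rfl)]
  cases cs with
  | nil => simp [tok, wordB, noAdj, chainB]
  | cons c cs' =>
    cases hfind : bases.find? (fun b => b.isPrefixOf (c :: cs')) with
    | none =>
      have htok : tok (c :: cs') = none := by rw [tok, hfind]
      simp [wordB, htok]
    | some b =>
      have hbmem := List.mem_of_find?_eq_some hfind
      have hblen : 1 ≤ b.length := bases_len _ hbmem
      have hbne : b ≠ [] := by intro h; rw [h] at hblen; simp at hblen
      have htok : tok (c :: cs') =
          (tok ((c :: cs').drop b.length)).map (fun ts => b :: ts) := by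
        rw [tok, hfind]
      rw [htok]
      cases htr : tok ((c :: cs').drop b.length) with
      | none => simp [wordB, htok, htr]
      | some ts' =>
        have hne' : ([] : List Char) ≠ b := fun h => hbne h.symm
        simp [wordB, htok, htr, chainB_eq, noAdj_cons2, hne']

theorem count_eq (l : List String) : ∀ (a : Int),
    l.foldl (fun answer x =>
      let r := x.toList.foldl aStep ([], [])
      if r.1.length = 0 then answer + 1 else answer) a =
    l.foldl (fun count x => if wordB x.toList then count + 1 else count) a := by
  induction l with
  | nil => intro a; rfl
  | cons x l ih =>
    intro a
    simp only [List.foldl_cons]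
    by_cases h : wordB x.toList = true
    · rw [if_pos ((word_iff x.toList).mpr h), if_pos h, ih]
    · rw [if_neg (fun hc => h ((word_iff x.toList).mp hc)), if_neg h, ih]

-- ===== VERDICT (by name: the statement is the Claim_ definition above) =====
theorem solution_spec : Claim_equal_solution := by
  intro babbling _
  unfold Spec_solution solution solution_alt
  exact count_eq babbling 0
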